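-- pv_equiv track=rewrite | github.com/javen-wangjunren/3D-Printing-Wordpress-Website | py-script/refactor_images.py | find_img_tag_end
-- ===== SOURCE A (Python) =====
-- def find_img_tag_end(s: str) -> int:
--     in_php = False
--     i = 0
--     while i < len(s):
--         if not in_php and s.startswith("<?", i):
--             in_php = True
--             i += 2
--             continue
--         if in_php and s.startswith("?>", i):
--             in_php = False
--             i += 2
--             continue
--         if not in_php and s[i] == ">":
--             return i
--         i += 1
--     return -1
-- ===== SOURCE B (Python) =====
-- def find_img_tag_end(s: str) -> int:
--     pos = 0
--     in_php = False
--     while True: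
--         if not in_php:
--             p = s.find("<?", pos)
--             g = s.find(">", pos)
--             if g != -1 and (p == -1 or g < p):
--                 return g
--             if p == -1:
--                 return -1
--             in_php = True
--             pos = p + 2
--         else:
--             e = s.find("?>", pos)
--             if e == -1:
--                 return -1
--             in_php = False
--             pos = e + 2
-- ===== Notes on version B (the rewrite author's own statement) =====
-- stated objective: faster
-- what changed: Replaces the char-by-char index walk with a segment-jumping scan that uses str.find to locate the next PHP-open marker, tag terminator or PHP-close marker and leaps straight to it.
import Mathlib
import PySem

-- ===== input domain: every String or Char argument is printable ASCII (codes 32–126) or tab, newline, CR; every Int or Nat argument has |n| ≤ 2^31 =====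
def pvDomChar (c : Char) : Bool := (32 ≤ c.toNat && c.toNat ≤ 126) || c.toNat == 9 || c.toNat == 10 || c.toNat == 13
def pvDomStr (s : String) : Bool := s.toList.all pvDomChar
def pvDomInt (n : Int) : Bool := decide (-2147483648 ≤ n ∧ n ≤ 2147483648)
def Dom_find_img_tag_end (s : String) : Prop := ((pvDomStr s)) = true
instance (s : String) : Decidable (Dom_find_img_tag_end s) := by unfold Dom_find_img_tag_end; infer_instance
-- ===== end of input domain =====

-- B replaces A's one-character-per-iteration index walk by a marker-jumping scan
-- that uses str.find to leap straight to the next PHP-open marker, PHP-close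
-- marker or tag-terminator character.

-- ===== PORT A =====
-- A walks the string one index at a time, toggling an in_php flag on the PHP
-- open/close markers and returning the first tag terminator seen outside PHP.
-- goA carries the remaining suffix
-- (cs = s[i:]) together with the current index i.
def goA (php : Bool) (cs : List Char) (i : Nat) : Int :=
  match cs with
  | [] => -1
  | c :: rest =>
    if !php && PySem.Chars.startswith (c :: rest) ['<', '?'] then
      goA true (rest.drop 1) (i + 2)
    else if php && PySem.Chars.startswith (c :: rest) ['?', '>'] then
      goA false (rest.drop 1) (i + 2)
    else if !php && (c == '>') then
      (i : Int)
    else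
      goA php rest (i + 1)
  termination_by cs.length
  decreasing_by all_goals (simp only [List.length_cons, List.length_drop]; omega)

def find_img_tag_end (s : String) : Int := goA false s.toList 0

-- ===== PORT B =====
-- used by goB for its termination and in-bounds proof obligations
theorem pvFindBound (l sub : List Char) (pos : Nat) (hpos : pos ≤ l.length)
    (h : ¬ PySem.Chars.findFrom l sub ↑pos none = -1) :
    0 ≤ PySem.Chars.findFrom l sub ↑pos none ∧
    pos ≤ (PySem.Chars.findFrom l sub ↑pos none).toNat ∧
    (PySem.Chars.findFrom l sub ↑pos none).toNat + sub.length ≤ l.length ∧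
    sub <+: l.drop ((PySem.Chars.findFrom l sub ↑pos none).toNat) := by
  rw [PySem.Chars.findFrom_natCast l sub pos hpos] at h ⊢
  by_cases hf : PySem.Chars.find (l.drop pos) sub = -1
  · exact absurd (if_pos hf) h
  · rw [if_neg hf] at h ⊢
    have h1 := PySem.Chars.neg_one_le_find (l.drop pos) sub
    have hge : 0 ≤ PySem.Chars.find (l.drop pos) sub := by omega
    obtain ⟨hsp, -⟩ := PySem.Chars.find_spec (s := l.drop pos) (sub := sub) hge
    rw [List.drop_drop] at hsp
    have hlen := hsp.length_le
    rw [List.length_drop] at hlen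
    have hub := PySem.Chars.find_le_length (l.drop pos) sub
    rw [List.length_drop] at hub
    have ht : (↑pos + PySem.Chars.find (l.drop pos) sub).toNat
        = pos + (PySem.Chars.find (l.drop pos) sub).toNat := by
      rw [Int.toNat_add (Int.natCast_nonneg pos) hge, Int.toNat_natCast]
    exact ⟨by omega, by rw [ht]; omega, by rw [ht]; omega, by rw [ht]; exact hsp⟩

-- goB l php pos ≈ the while-True loop of Source B with s = l, in_php = php, current
-- search position pos (always ≤ len(s)); p/g/e of Source B appear inlined.
def goB (l : List Char) (php : Bool) (pos : Nat) (hpos : pos ≤ l.length) : Int :=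
  if php then
    if he : PySem.Chars.findFrom l ['?', '>'] ↑pos none = -1 then -1
    else
      goB l false ((PySem.Chars.findFrom l ['?', '>'] ↑pos none).toNat + 2)
        (by obtain ⟨-, -, h3, -⟩ := pvFindBound l ['?', '>'] pos hpos he; simpa using h3)
  else
    if (PySem.Chars.findFrom l ['>'] ↑pos none ≠ -1 ∧
        (PySem.Chars.findFrom l ['<', '?'] ↑pos none = -1 ∨
         PySem.Chars.findFrom l ['>'] ↑pos none < PySem.Chars.findFrom l ['<', '?'] ↑pos none)) then
      PySem.Chars.findFrom l ['>'] ↑pos none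
    else if hp : PySem.Chars.findFrom l ['<', '?'] ↑pos none = -1 then -1
    else
      goB l true ((PySem.Chars.findFrom l ['<', '?'] ↑pos none).toNat + 2)
        (by obtain ⟨-, -, h3, -⟩ := pvFindBound l ['<', '?'] pos hpos hp; simpa using h3)
  termination_by l.length - pos
  decreasing_by
  · obtain ⟨-, h2, h3, -⟩ := pvFindBound l ['?', '>'] pos hpos he
    simp only [List.length_cons, List.length_nil] at h3; omega
  · obtain ⟨-, h2, h3, -⟩ := pvFindBound l ['<', '?'] pos hpos hp
    simp only [List.length_cons, List.length_nil] at h3; omega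

def find_img_tag_end_alt (s : String) : Int := goB s.toList false 0 (by simp)

-- ===== PRECONDITION & SPEC =====
def Spec_find_img_tag_end (s : String) (out : Int) : Prop := out = find_img_tag_end_alt s
instance (s : String) (out : Int) : Decidable (Spec_find_img_tag_end s out) := by unfold Spec_find_img_tag_end; infer_instance

-- ===== CLAIM (what is proved, stated in full; the proofs are below) =====
def Claim_equal_find_img_tag_end : Prop := ∀ (s : String), Dom_find_img_tag_end s → Spec_find_img_tag_end s (find_img_tag_end s)

-- ===== LEMMAS AND PROOFS =====

-- find = 0 when sub is a prefix
theorem pvFindZero (l sub : List Char) (h : sub <+: l) : PySem.Chars.find l sub = 0 := by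
  have h0 : 0 ≤ PySem.Chars.find l sub := (PySem.Chars.find_nonneg_iff l sub).2 h.isInfix
  obtain ⟨h1, h2⟩ := PySem.Chars.find_spec (s := l) (sub := sub) h0
  by_contra hne
  have : 0 < (PySem.Chars.find l sub).toNat := by omega
  exact (h2 0 this) (by simpa using h)

theorem pvFindFromSelf (l sub : List Char) (pos : Nat) (hpos : pos ≤ l.length)
    (h : sub <+: l.drop pos) :
    PySem.Chars.findFrom l sub ↑pos none = ↑pos := by
  rw [PySem.Chars.findFrom_natCast l sub pos hpos, pvFindZero _ _ h]
  norm_num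

theorem pvFindCons (c : Char) (l sub : List Char) (hne : ¬ sub <+: c :: l) :
    PySem.Chars.find (c :: l) sub =
      if PySem.Chars.find l sub = -1 then -1 else 1 + PySem.Chars.find l sub := by
  by_cases h : PySem.Chars.find l sub = -1
  · rw [if_pos h]
    rw [PySem.Chars.find_eq_neg_one_iff] at h ⊢
    intro hin
    obtain ⟨j, hj⟩ := (PySem.Chars.exists_prefix_drop_iff_isIn sub (c :: l)).2
      ((PySem.Chars.isIn_iff_infix sub (c :: l)).2 hin)
    cases j with
    | zero => exact hne (by simpa using hj)
    | succ j =>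
        exact h ((PySem.Chars.isIn_iff_infix sub l).1
          ((PySem.Chars.exists_prefix_drop_iff_isIn sub l).1 ⟨j, by simpa using hj⟩))
  · have hf0 : 0 ≤ PySem.Chars.find l sub := by
      have := PySem.Chars.neg_one_le_find l sub; omega
    obtain ⟨hf1, hf2⟩ := PySem.Chars.find_spec (s := l) (sub := sub) hf0
    have hin : sub <+: (c :: l).drop ((PySem.Chars.find l sub).toNat + 1) := by simpa using hf1
    have hm0 : 0 ≤ PySem.Chars.find (c :: l) sub := by
      rw [PySem.Chars.find_nonneg_iff]
      exact (PySem.Chars.isIn_iff_infix sub (c :: l)).1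
        ((PySem.Chars.exists_prefix_drop_iff_isIn sub (c :: l)).1
          ⟨(PySem.Chars.find l sub).toNat + 1, hin⟩)
    obtain ⟨hm1, hm2⟩ := PySem.Chars.find_spec (s := c :: l) (sub := sub) hm0
    have hmne : (PySem.Chars.find (c :: l) sub).toNat ≠ 0 := by
      intro h0; rw [h0] at hm1; exact hne (by simpa using hm1)
    have hub : (PySem.Chars.find (c :: l) sub).toNat ≤ (PySem.Chars.find l sub).toNat + 1 := by
      by_contra hgt
      exact hm2 _ (by omega) hin
    have hlb : (PySem.Chars.find l sub).toNat ≤ (PySem.Chars.find (c :: l) sub).toNat - 1 := by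
      by_contra hgt
      have hpre : sub <+: l.drop ((PySem.Chars.find (c :: l) sub).toNat - 1) := by
        have h' := hm1
        rw [show (PySem.Chars.find (c :: l) sub).toNat =
              ((PySem.Chars.find (c :: l) sub).toNat - 1) + 1 by omega] at h'
        simpa using h'
      exact hf2 _ (by omega) hpre
    rw [if_neg h]
    omega

theorem pvFindFromSucc (l sub : List Char) (pos : Nat) (hpos : pos < l.length)
    (h : ¬ sub <+: l.drop pos) :
    PySem.Chars.findFrom l sub ↑pos none = PySem.Chars.findFrom l sub ↑(pos + 1) none := by
  rw [PySem.Chars.findFrom_natCast l sub pos (by omega),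
      PySem.Chars.findFrom_natCast l sub (pos + 1) (by omega)]
  have hd : l.drop pos = l[pos] :: l.drop (pos + 1) := List.drop_eq_getElem_cons hpos
  rw [hd] at h ⊢
  rw [pvFindCons _ _ _ h]
  by_cases hf : PySem.Chars.find (l.drop (pos + 1)) sub = -1
  · simp [hf]
  · have := PySem.Chars.neg_one_le_find (l.drop (pos + 1)) sub
    rw [if_neg hf, if_neg hf, if_neg (by omega : ¬ (1 + PySem.Chars.find (l.drop (pos + 1)) sub = -1))]
    push_cast
    ring

theorem pvGoBNil (l : List Char) (php : Bool) (pos : Nat) (hpos : pos ≤ l.length)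
    (hdrop : l.drop pos = []) : goB l php pos hpos = -1 := by
  have e1 : PySem.Chars.find ([] : List Char) ['?', '>'] = -1 := by decide
  have e2 : PySem.Chars.find ([] : List Char) ['<', '?'] = -1 := by decide
  have e3 : PySem.Chars.find ([] : List Char) ['>'] = -1 := by decide
  have h1 : PySem.Chars.findFrom l ['?', '>'] ↑pos none = -1 := by
    rw [PySem.Chars.findFrom_natCast l _ pos hpos, hdrop, e1]; simp
  have h2 : PySem.Chars.findFrom l ['<', '?'] ↑pos none = -1 := by
    rw [PySem.Chars.findFrom_natCast l _ pos hpos, hdrop, e2]; simp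
  have h3 : PySem.Chars.findFrom l ['>'] ↑pos none = -1 := by
    rw [PySem.Chars.findFrom_natCast l _ pos hpos, hdrop, e3]; simp
  rw [goB]
  cases php <;> simp [h1, h2, h3]

theorem pvGoBCongr (l : List Char) (php : Bool) {p q : Nat} (hp : p ≤ l.length)
    (hq : q ≤ l.length) (hpq : p = q) : goB l php p hp = goB l php q hq := by
  subst hpq; rfl

-- main loop equivalence: B's marker-jumping loop computes what A's index walk computes
theorem pvMain (l : List Char) : ∀ (n : Nat) (php : Bool) (pos : Nat)
    (hpos : pos ≤ l.length), l.length - pos ≤ n →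
    goB l php pos hpos = goA php (l.drop pos) pos := by
  intro n
  induction n with
  | zero =>
    intro php pos hpos hn
    have hdrop : l.drop pos = [] := List.drop_eq_nil_of_le (by omega)
    rw [pvGoBNil l php pos hpos hdrop, hdrop]
    simp [goA]
  | succ n ih =>
    intro php pos hpos hn
    cases hdrop : l.drop pos with
    | nil => rw [pvGoBNil l php pos hpos hdrop]; simp [goA]
    | cons c rest =>
      have hlt : pos < l.length := by
        by_contra hh
        rw [List.drop_eq_nil_of_le (by omega)] at hdrop
        simp at hdrop
      have hget := List.drop_eq_getElem_cons hlt (l := l)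
      rw [hdrop] at hget
      obtain ⟨hc, hrest⟩ : c = l[pos] ∧ rest = l.drop (pos + 1) := by
        injection hget with a b; exact ⟨a, b⟩
      cases php with
      | true =>
        by_cases hpre : ['?', '>'] <+: l.drop pos
        · -- PHP-close marker at pos: both jump to pos + 2
          have hlen2 : pos + 2 ≤ l.length := by
            have := hpre.length_le
            rw [List.length_drop] at this
            simp at this; omega
          have he : PySem.Chars.findFrom l ['?', '>'] ↑pos none = ↑pos :=
            pvFindFromSelf l _ pos hpos hpre
          have hsw : PySem.Chars.startswith (c :: rest) ['?', '>'] = true := by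
            rw [PySem.Chars.startswith_iff]; rw [hdrop] at hpre; exact hpre
          have hdd : rest.drop 1 = l.drop (pos + 2) := by
            rw [hrest, List.drop_drop]
          have hA : goA true (c :: rest) pos = goA false (l.drop (pos + 2)) (pos + 2) := by
            rw [goA]
            simp [hsw, hdd]
          rw [hA, goB, if_pos rfl]
          rw [dif_neg (by rw [he]; omega)]
          exact (pvGoBCongr l false _ hlen2 (by rw [he]; simp)).trans
            (ih false (pos + 2) hlen2 (by omega))
        · -- no PHP-close marker at pos: B's search result is unchanged when starting one later
          have he := pvFindFromSucc l ['?', '>'] pos hlt hpre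
          have hstep : goB l true pos hpos = goB l true (pos + 1) (by omega) := by
            by_cases hcase : PySem.Chars.findFrom l ['?', '>'] ↑(pos + 1) none = -1
            · rw [goB, goB, if_pos rfl, if_pos rfl, dif_pos (he.trans hcase), dif_pos hcase]
            · rw [goB, goB, if_pos rfl, if_pos rfl,
                dif_neg (he ▸ hcase), dif_neg hcase]
              exact pvGoBCongr l false _ _ (by rw [he])
          have hsw : PySem.Chars.startswith (c :: rest) ['?', '>'] = false := by
            rw [← Bool.not_eq_true, PySem.Chars.startswith_iff]
            rw [hdrop] at hpre; exact hpre
          rw [hrest] at hsw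
          rw [hstep, ih true (pos + 1) (by omega) (by omega), goA, hrest]
          simp [hsw]
      | false =>
        by_cases hpre : ['<', '?'] <+: l.drop pos
        · -- PHP-open marker at pos: condition g<p cannot hold, both jump into PHP at pos + 2
          have hlen2 : pos + 2 ≤ l.length := by
            have := hpre.length_le
            rw [List.length_drop] at this
            simp at this; omega
          have hp : PySem.Chars.findFrom l ['<', '?'] ↑pos none = ↑pos :=
            pvFindFromSelf l _ pos hpos hpre
          have hcond : ¬ (PySem.Chars.findFrom l ['>'] ↑pos none ≠ -1 ∧
              (PySem.Chars.findFrom l ['<', '?'] ↑pos none = -1 ∨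
               PySem.Chars.findFrom l ['>'] ↑pos none < PySem.Chars.findFrom l ['<', '?'] ↑pos none)) := by
            rw [hp]
            rintro ⟨hg1, hg2 | hg2⟩
            · omega
            · obtain ⟨hb1, hb2, -, -⟩ := pvFindBound l ['>'] pos hpos hg1
              omega
          have hsw : PySem.Chars.startswith (c :: rest) ['<', '?'] = true := by
            rw [PySem.Chars.startswith_iff]; rw [hdrop] at hpre; exact hpre
          have hdd : rest.drop 1 = l.drop (pos + 2) := by
            rw [hrest, List.drop_drop]
          have hA : goA false (c :: rest) pos = goA true (l.drop (pos + 2)) (pos + 2) := by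
            rw [goA]
            simp [hsw, hdd]
          rw [hA, goB, if_neg (by simp), if_neg hcond,
            dif_neg (by rw [hp]; omega : ¬ (PySem.Chars.findFrom l ['<', '?'] ↑pos none = -1))]
          exact (pvGoBCongr l true _ hlen2 (by rw [hp]; simp)).trans
            (ih true (pos + 2) hlen2 (by omega))
        · by_cases hgt : c = '>'
          · -- tag terminator at pos outside PHP: B's condition holds with g = pos; A returns pos
            subst hgt
            have hg : PySem.Chars.findFrom l ['>'] ↑pos none = ↑pos := by
              apply pvFindFromSelf l _ pos hpos
              rw [hdrop]
              exact List.cons_prefix_cons.mpr ⟨rfl, List.nil_prefix⟩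
            have hcond : PySem.Chars.findFrom l ['>'] ↑pos none ≠ -1 ∧
                (PySem.Chars.findFrom l ['<', '?'] ↑pos none = -1 ∨
                 PySem.Chars.findFrom l ['>'] ↑pos none < PySem.Chars.findFrom l ['<', '?'] ↑pos none) := by
              refine ⟨by rw [hg]; omega, ?_⟩
              by_cases hp : PySem.Chars.findFrom l ['<', '?'] ↑pos none = -1
              · exact Or.inl hp
              · refine Or.inr ?_
                obtain ⟨hb1, hb2, -, hb4⟩ := pvFindBound l ['<', '?'] pos hpos hp
                have hne : (PySem.Chars.findFrom l ['<', '?'] ↑pos none).toNat ≠ pos := by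
                  intro hEq; rw [hEq] at hb4; exact hpre hb4
                rw [hg]; omega
            have hsw : PySem.Chars.startswith ('>' :: rest) ['<', '?'] = false := by
              rw [← Bool.not_eq_true, PySem.Chars.startswith_iff]
              rw [hdrop] at hpre; exact hpre
            rw [goB, if_neg (by simp), if_pos hcond, hg, goA]
            simp [hsw]
          · -- ordinary character: both searches are unchanged when starting one later
            have h1 := pvFindFromSucc l ['<', '?'] pos hlt hpre
            have h2 : ¬ ['>'] <+: l.drop pos := by
              rw [hdrop]
              intro hp
              exact hgt (List.cons_prefix_cons.mp hp).1.symm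
            have h2' := pvFindFromSucc l ['>'] pos hlt h2
            have hstep : goB l false pos hpos = goB l false (pos + 1) (by omega) := by
              rw [goB, goB]
              simp only [Bool.false_eq_true, if_false, h1, h2']
            have hsw : PySem.Chars.startswith (c :: rest) ['<', '?'] = false := by
              rw [← Bool.not_eq_true, PySem.Chars.startswith_iff]
              rw [hdrop] at hpre; exact hpre
            rw [hrest] at hsw
            rw [hstep, ih false (pos + 1) (by omega) (by omega), goA, hrest]
            simp [hsw, hgt]

-- ===== VERDICT (by name: the statement is the Claim_ definition above) =====
theorem find_img_tag_end_spec : Claim_equal_find_img_tag_end := by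
  intro s _
  unfold Spec_find_img_tag_end find_img_tag_end find_img_tag_end_alt
  rw [pvMain s.toList s.toList.length false 0 (by simp) (by simp)]
  simp
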